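-- pv_equiv track=rewrite | github.com/thisiseddy-ab/ComfyUI-Edins-Ultimate-Pack | EUP/nodes/latent.py | unpackTiles
-- ===== SOURCE A (Python) =====
-- def unpackTiles(pass_data):
--     latent_tiles = []
--     tile_positions = []
--     noise_masks = []
--
--     for tile_group in pass_data:
--         for tile, pos, mask in tile_group:
--             latent_tiles.append(tile)
--             tile_positions.append(pos)
--             noise_masks.append(mask)
--
--     return latent_tiles, tile_positions, noise_masks
-- ===== SOURCE B (Python) =====
-- def unpackTiles(pass_data):
--     flat = [(tile, pos, mask) for group in pass_data for tile, pos, mask in group]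
--     if not flat:
--         return [], [], []
--     tiles, positions, masks = (list(c) for c in zip(*flat))
--     return tiles, positions, masks
-- ===== Notes on version B (the rewrite author's own statement) =====
-- stated objective: idiomatic
-- what changed: Replaces three parallel accumulator lists built in nested loops by a flatten-into-one-list-of-triples comprehension followed by a zip(*...) transpose.
import Mathlib
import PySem

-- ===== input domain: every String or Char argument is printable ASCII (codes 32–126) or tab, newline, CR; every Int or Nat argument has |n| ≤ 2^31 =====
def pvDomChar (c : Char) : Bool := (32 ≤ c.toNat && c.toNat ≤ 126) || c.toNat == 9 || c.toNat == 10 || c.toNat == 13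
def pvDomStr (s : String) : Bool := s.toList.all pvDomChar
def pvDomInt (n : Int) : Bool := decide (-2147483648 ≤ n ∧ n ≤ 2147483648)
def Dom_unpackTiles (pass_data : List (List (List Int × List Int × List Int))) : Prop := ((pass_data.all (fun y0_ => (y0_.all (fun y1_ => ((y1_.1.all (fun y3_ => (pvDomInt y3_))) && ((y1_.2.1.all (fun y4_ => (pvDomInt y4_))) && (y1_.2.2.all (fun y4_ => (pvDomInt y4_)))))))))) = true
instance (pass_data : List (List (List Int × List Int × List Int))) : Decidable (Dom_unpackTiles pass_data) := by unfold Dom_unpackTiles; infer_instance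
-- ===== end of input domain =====

-- B replaces A's three parallel accumulator lists built by nested loops with an
-- idiomatic flatten-into-triples comprehension followed by a zip(*...) transpose.

-- ===== PORT A =====
-- nested loops appending to three accumulators, as nested foldl over the same state
def unpackTiles (pass_data : List (List (List Int × List Int × List Int))) : List (List Int) × List (List Int) × List (List Int) :=
  pass_data.foldl
    (fun acc tile_group =>
      tile_group.foldl
        (fun acc2 tpm =>
          (acc2.1 ++ [tpm.1], acc2.2.1 ++ [tpm.2.1], acc2.2.2 ++ [tpm.2.2]))
        acc)
    ([], [], [])

-- ===== PORT B =====
-- flat = all triples of all groups; empty guard; then the zip(*flat) transpose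
-- (ported as the three component projections of the flat list)
def unpackTiles_alt (pass_data : List (List (List Int × List Int × List Int))) : List (List Int) × List (List Int) × List (List Int) :=
  let flat := pass_data.flatMap (fun group => group)
  if flat.isEmpty then ([], [], [])
  else (flat.map (fun t => t.1), flat.map (fun t => t.2.1), flat.map (fun t => t.2.2))

-- ===== PRECONDITION & SPEC =====
def Spec_unpackTiles (pass_data : List (List (List Int × List Int × List Int))) (out : List (List Int) × List (List Int) × List (List Int)) : Prop := out = unpackTiles_alt pass_data
instance (pass_data : List (List (List Int × List Int × List Int))) (out : List (List Int) × List (List Int) × List (List Int)) : Decidable (Spec_unpackTiles pass_data out) := by unfold Spec_unpackTiles; infer_instance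

-- ===== CLAIM (what is proved, stated in full; the proofs are below) =====
def Claim_equal_unpackTiles : Prop := ∀ (pass_data : List (List (List Int × List Int × List Int))), Dom_unpackTiles pass_data → Spec_unpackTiles pass_data (unpackTiles pass_data)

-- ===== LEMMAS AND PROOFS =====

theorem unpackTiles_inner (g : List (List Int × List Int × List Int))
    (a b c : List (List Int)) :
    g.foldl (fun acc2 tpm => (acc2.1 ++ [tpm.1], acc2.2.1 ++ [tpm.2.1], acc2.2.2 ++ [tpm.2.2])) (a, b, c)
      = (a ++ g.map (fun t => t.1), b ++ g.map (fun t => t.2.1), c ++ g.map (fun t => t.2.2)) := by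
  induction g generalizing a b c with
  | nil => simp
  | cons h t ih => simp [List.foldl, ih]

theorem unpackTiles_outer (l : List (List (List Int × List Int × List Int)))
    (a b c : List (List Int)) :
    l.foldl (fun acc tile_group =>
      tile_group.foldl (fun acc2 tpm => (acc2.1 ++ [tpm.1], acc2.2.1 ++ [tpm.2.1], acc2.2.2 ++ [tpm.2.2])) acc)
      (a, b, c)
      = (a ++ (l.flatMap (fun g => g)).map (fun t => t.1),
         b ++ (l.flatMap (fun g => g)).map (fun t => t.2.1),
         c ++ (l.flatMap (fun g => g)).map (fun t => t.2.2)) := by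
  induction l generalizing a b c with
  | nil => simp
  | cons h t ih => simp [List.foldl, unpackTiles_inner, ih]

-- ===== VERDICT (by name: the statement is the Claim_ definition above) =====
theorem unpackTiles_spec : Claim_equal_unpackTiles := by
  intro pass_data _
  show unpackTiles pass_data = unpackTiles_alt pass_data
  unfold unpackTiles unpackTiles_alt
  rw [unpackTiles_outer]
  by_cases h : (pass_data.flatMap (fun g => g)).isEmpty
  · simp_all [List.isEmpty_iff]
  · simp
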